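-- pv_equiv track=rewrite | github.com/rasmusesa/NPLproject | src/vocabulary_analyzer.py | calculate_cumulative_vocabulary
-- ===== SOURCE A (Python) =====
-- modal_verbs = ['can', 'may', 'must', 'shall', 'will', 'could', 'might', 'should', 'would']
--
-- def calculate_cumulative_vocabulary(tokens):
--     """
--     Calculate cumulative vocabulary size and cumulative count of modal verbs as tokens accumulate.
--     """
--     vocab_set = set()
--     cumulative_vocab_sizes = []
--     cumulative_tokens = []
--     cumulative_modal_count = []
--     filtered_tokens = [token for token in tokens if token.isalpha()]
--
--     modal_count = 0
--
--     for i, token in enumerate(filtered_tokens, start=1):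
--         if token in modal_verbs:
--             modal_count += 1
--         cumulative_modal_count.append(modal_count)
--
--         vocab_set.add(token)
--
--         cumulative_tokens.append(i)
--         cumulative_vocab_sizes.append(len(vocab_set))
--
--     return cumulative_tokens, cumulative_vocab_sizes, cumulative_modal_count
-- ===== SOURCE B (Python) =====
-- modal_verbs = ['can', 'may', 'must', 'shall', 'will', 'could', 'might', 'should', 'would']
--
-- def _prefix_sums(xs):
--     out = []
--     s = 0
--     for x in xs:
--         s += x
--         out.append(s)
--     return out
--
-- def calculate_cumulative_vocabulary(tokens):
--     """
--     Two-pass reformulation: build 0/1 indicator lists (modal, first-occurrence),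
--     then take prefix sums.
--     """
--     filtered = [t for t in tokens if t.isalpha()]
--     modal_flags = [1 if t in modal_verbs else 0 for t in filtered]
--     seen = set()
--     novelty_flags = []
--     for t in filtered:
--         novelty_flags.append(0 if t in seen else 1)
--         seen.add(t)
--     n = len(filtered)
--     return (list(range(1, n + 1)),
--             _prefix_sums(novelty_flags),
--             _prefix_sums(modal_flags))
-- ===== Notes on version B (the rewrite author's own statement) =====
-- stated objective: alternative
-- what changed: Replaced the single interleaved loop (incremental set size, running modal counter, index counter) by two phases: build 0/1 indicator lists for modal verbs and first occurrences, then obtain all three outputs as a range and two prefix sums.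
import Mathlib
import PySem

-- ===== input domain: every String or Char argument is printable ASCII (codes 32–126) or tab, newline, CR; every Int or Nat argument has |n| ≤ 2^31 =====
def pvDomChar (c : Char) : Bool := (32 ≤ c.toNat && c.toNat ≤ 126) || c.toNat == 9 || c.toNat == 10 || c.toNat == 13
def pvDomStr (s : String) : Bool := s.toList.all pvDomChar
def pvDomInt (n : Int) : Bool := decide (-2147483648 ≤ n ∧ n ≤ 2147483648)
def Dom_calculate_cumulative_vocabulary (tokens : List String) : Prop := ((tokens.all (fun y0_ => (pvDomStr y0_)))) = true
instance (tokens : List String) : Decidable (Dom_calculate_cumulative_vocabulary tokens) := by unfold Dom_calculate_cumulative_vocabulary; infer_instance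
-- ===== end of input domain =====

-- B replaces A's single interleaved incremental loop by indicator lists plus prefix sums (alternative decomposition, same cost).

-- ===== PORT A =====
def modal_verbs : List String := ["can", "may", "must", "shall", "will", "could", "might", "should", "would"]

-- the for-loop of A: state = (vocab_set, i, modal_count, cumulative_tokens, cumulative_vocab_sizes, cumulative_modal_count)
def ccvLoopA : List String → PySem.Set String → Int → Int → List Int → List Int → List Int →
    List Int × List Int × List Int
  | [], _, _, _, ct, cvs, cmc => (ct, cvs, cmc)
  | token :: rest, vocab, i, mc, ct, cvs, cmc =>
    let mc' := if token ∈ modal_verbs then mc + 1 else mc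
    let cmc' := cmc ++ [mc']
    let vocab' := PySem.Set.add vocab token
    let ct' := ct ++ [i]
    let cvs' := cvs ++ [(PySem.Set.len vocab' : Int)]
    ccvLoopA rest vocab' (i + 1) mc' ct' cvs' cmc'

def calculate_cumulative_vocabulary (tokens : List String) : List Int × List Int × List Int :=
  let filtered_tokens := tokens.filter (fun t => PySem.Str.strIsalpha t)
  ccvLoopA filtered_tokens PySem.Set.empty 1 0 [] [] []

-- ===== PORT B =====
-- _prefix_sums from Source B (append loop, running total)
def prefixSumsB (xs : List Int) : List Int :=
  (xs.foldl (fun (acc : List Int × Int) x => (acc.1 ++ [acc.2 + x], acc.2 + x)) ([], 0)).1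

-- novelty-flag loop from Source B: append 0/1, then add to seen
def noveltyFlagsB : List String → PySem.Set String → List Int
  | [], _ => []
  | t :: rest, seen =>
    (if PySem.Set.contains seen t then (0 : Int) else 1) :: noveltyFlagsB rest (PySem.Set.add seen t)

def calculate_cumulative_vocabulary_alt (tokens : List String) : List Int × List Int × List Int :=
  let filtered := tokens.filter (fun t => PySem.Str.strIsalpha t)
  let modal_flags := filtered.map (fun t => if t ∈ modal_verbs then (1 : Int) else 0)
  let novelty_flags := noveltyFlagsB filtered PySem.Set.empty
  let n : Int := filtered.length
  (PySem.List.pyRange 1 (n + 1) 1, prefixSumsB novelty_flags, prefixSumsB modal_flags)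

-- ===== PRECONDITION & SPEC =====
def Spec_calculate_cumulative_vocabulary (tokens : List String) (out : List Int × List Int × List Int) : Prop := out = calculate_cumulative_vocabulary_alt tokens
instance (tokens : List String) (out : List Int × List Int × List Int) : Decidable (Spec_calculate_cumulative_vocabulary tokens out) := by unfold Spec_calculate_cumulative_vocabulary; infer_instance

-- ===== CLAIM (what is proved, stated in full; the proofs are below) =====
def Claim_equal_calculate_cumulative_vocabulary : Prop := ∀ (tokens : List String), Dom_calculate_cumulative_vocabulary tokens → Spec_calculate_cumulative_vocabulary tokens (calculate_cumulative_vocabulary tokens)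

-- ===== LEMMAS AND PROOFS =====

-- generalized prefix sums with starting total s
def prefixFrom (s : Int) : List Int → List Int
  | [] => []
  | x :: xs => (s + x) :: prefixFrom (s + x) xs

theorem prefixSumsB_foldl (xs : List Int) (acc : List Int) (s : Int) :
    (xs.foldl (fun (acc : List Int × Int) x => (acc.1 ++ [acc.2 + x], acc.2 + x)) (acc, s)).1
      = acc ++ prefixFrom s xs := by
  induction xs generalizing acc s with
  | nil => simp [prefixFrom]
  | cons x xs ih => simp [List.foldl, prefixFrom, ih]

theorem prefixSumsB_eq (xs : List Int) : prefixSumsB xs = prefixFrom 0 xs := by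
  simpa using prefixSumsB_foldl xs [] 0

-- main loop invariant: A's loop, started in state (vocab,i,mc,ct,cvs,cmc), returns the
-- already-built lists extended by a range / the prefix sums of B's two indicator lists
theorem ccvLoopA_eq (l : List String) : ∀ (vocab : PySem.Set String) (i mc : Int)
    (ct cvs cmc : List Int),
    ccvLoopA l vocab i mc ct cvs cmc
      = (ct ++ PySem.List.pyRange i (i + l.length) 1,
         cvs ++ prefixFrom (PySem.Set.len vocab) (noveltyFlagsB l vocab),
         cmc ++ prefixFrom mc (l.map (fun t => if t ∈ modal_verbs then (1 : Int) else 0))) := by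
  induction l with
  | nil =>
    intro vocab i mc ct cvs cmc
    simp [ccvLoopA, noveltyFlagsB, prefixFrom, PySem.List.pyRange_one_eq_nil]
  | cons t rest ih =>
    intro vocab i mc ct cvs cmc
    have hrange : PySem.List.pyRange i (i + ((t :: rest).length : Int)) 1
        = i :: PySem.List.pyRange (i + 1) (i + 1 + (rest.length : Int)) 1 := by
      rw [PySem.List.pyRange_one_cons (by simp only [List.length_cons]; push_cast; omega),
        show i + ((t :: rest).length : Int) = i + 1 + (rest.length : Int) from by
          simp only [List.length_cons]; push_cast; omega]
    have hlen : ((PySem.Set.add vocab t).length : Int)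
        = (vocab.length : Int) + (if PySem.Set.contains vocab t then (0 : Int) else 1) := by
      by_cases h : t ∈ vocab <;> simp [h]
    have hm : (if t ∈ modal_verbs then mc + 1 else mc)
        = mc + (if t ∈ modal_verbs then (1 : Int) else 0) := by split_ifs <;> omega
    simp only [ccvLoopA, List.map_cons, noveltyFlagsB, prefixFrom]
    rw [ih, hrange]
    simp [PySem.Set.len, hlen, hm]

theorem pyRange_shift (n : Nat) :
    PySem.List.pyRange 1 (1 + (n : Int)) 1 = PySem.List.pyRange 1 ((n : Int) + 1) 1 := by
  congr 1
  omega

-- ===== VERDICT (by name: the statement is the Claim_ definition above) =====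
theorem calculate_cumulative_vocabulary_spec : Claim_equal_calculate_cumulative_vocabulary := by
  intro tokens _
  unfold Spec_calculate_cumulative_vocabulary
  unfold calculate_cumulative_vocabulary calculate_cumulative_vocabulary_alt
  simp only []
  rw [ccvLoopA_eq]
  simp [prefixSumsB_eq, pyRange_shift, PySem.Set.len, PySem.Set.empty]
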